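-- pv_equiv track=rewrite | github.com/john--/klipper | klippy/extras/display/ssd1327.py | frames_8_to_32_pair
-- ===== SOURCE A (Python) =====
-- def frames_8_to_32_pair(frames):
--     pix_num = 0
--     buf = [0] * (len(frames) * 4)
--     for frame_height in range(0, 8):
--         for fnum, frame in enumerate(frames):
--             if (frame >> frame_height) & 0x01:
--                 if pix_num % 2 == 0: # 0=nibble order
--                     buf[pix_num // 2] |= 0xF0
--                 else:
--                     buf[pix_num // 2] |= 0x0F
--             pix_num += 1
--     return buf
-- ===== SOURCE B (Python) =====
-- def frames_8_to_32_pair(frames):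
--     # Output-driven: each output byte i packs flat pixels 2*i and 2*i+1,
--     # where flat pixel p corresponds to height p//len(frames) of frame p%len(frames).
--     n = len(frames)
--
--     def bit(p):
--         return (frames[p % n] >> (p // n)) & 1
--
--     return [(0xF0 if bit(2 * i) else 0) | (0x0F if bit(2 * i + 1) else 0)
--             for i in range(n * 4)]
-- ===== Notes on version B (the rewrite author's own statement) =====
-- stated objective: alternative
-- what changed: B is output-driven: instead of A's height/frame double loop with a running pix_num counter and |= read-modify-write into a preallocated buffer, B maps each output byte index i directly to its two flat pixels 2*i and 2*i+1 and computes the byte in one expression from the closed index mapping p -> (frames[p % n] >> (p // n)) & 1, maintaining no state at all.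
import Mathlib
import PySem

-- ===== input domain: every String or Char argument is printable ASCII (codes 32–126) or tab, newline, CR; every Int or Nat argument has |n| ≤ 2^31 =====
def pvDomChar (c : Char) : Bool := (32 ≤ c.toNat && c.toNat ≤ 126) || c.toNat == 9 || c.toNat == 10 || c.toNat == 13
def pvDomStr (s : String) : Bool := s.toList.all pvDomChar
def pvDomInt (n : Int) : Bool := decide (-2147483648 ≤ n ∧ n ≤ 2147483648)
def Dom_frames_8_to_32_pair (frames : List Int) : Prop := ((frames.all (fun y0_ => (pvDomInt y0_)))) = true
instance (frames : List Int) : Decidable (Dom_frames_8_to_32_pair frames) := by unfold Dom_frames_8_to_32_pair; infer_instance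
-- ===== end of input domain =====

-- B packs the frame bits output-driven: each output byte is computed directly from its
-- index via the flat-pixel mapping p ↦ (p // len, p % len), instead of A's running
-- pix_num counter with read-modify-write |= into a preallocated buffer (objective: alternative).


-- ===== PORT A =====
-- inner loop body of A: state is (pix_num, buf); fnum (pr.1) is unused by the body, as in the Python.
-- 'frame >> frame_height' is Lean's '>>>' (fh comes from range(0,8), so fh.toNat is exact);
-- '& 0x01' is PySem.Int.band; truthiness of the int is '≠ 0'; buf[pix//2] is always in range,
-- so List.getD/List.set are exact for the read and write.
def pvAInner (fh : Int) (st : Nat × List Int) (pr : Int × Int) : Nat × List Int :=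
  let buf := st.2
  let buf' :=
    if PySem.Int.band (pr.2 >>> fh.toNat) 1 ≠ 0 then
      if st.1 % 2 = 0 then buf.set (st.1 / 2) (PySem.Int.bor (buf.getD (st.1 / 2) 0) 0xF0)
      else buf.set (st.1 / 2) (PySem.Int.bor (buf.getD (st.1 / 2) 0) 0x0F)
    else buf
  (st.1 + 1, buf')

def frames_8_to_32_pair (frames : List Int) : List Int :=
  ((PySem.List.pyRange 0 8 1).foldl
    (fun st fh => (PySem.List.enumerate frames 0).foldl (pvAInner fh) st)
    (0, List.replicate (frames.length * 4) 0)).2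

-- ===== PORT B =====
-- bit of flat pixel p: frames[p % n] >> (p // n) & 1; the index p % n is always < n here,
-- so List.getD is exact for frames[p % n].
def pvBit (frames : List Int) (p : Nat) : Int :=
  PySem.Int.band (frames.getD (p % frames.length) 0 >>> (p / frames.length)) 1

def frames_8_to_32_pair_alt (frames : List Int) : List Int :=
  (List.range (frames.length * 4)).map (fun i =>
    PySem.Int.bor (if pvBit frames (2 * i) ≠ 0 then 0xF0 else 0)
                  (if pvBit frames (2 * i + 1) ≠ 0 then 0x0F else 0))

-- ===== PRECONDITION & SPEC =====
def Spec_frames_8_to_32_pair (frames : List Int) (out : List Int) : Prop := out = frames_8_to_32_pair_alt frames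
instance (frames : List Int) (out : List Int) : Decidable (Spec_frames_8_to_32_pair frames out) := by unfold Spec_frames_8_to_32_pair; infer_instance

-- ===== CLAIM (what is proved, stated in full; the proofs are below) =====
def Claim_equal_frames_8_to_32_pair : Prop := ∀ (frames : List Int), Dom_frames_8_to_32_pair frames → Spec_frames_8_to_32_pair frames (frames_8_to_32_pair frames)

-- ===== LEMMAS AND PROOFS =====

-- one flat-pixel update, phrased on the output byte p/2 (proof-side reformulation of A's body)
def pvApply (frames : List Int) (buf : List Int) (p : Nat) : List Int :=
  if pvBit frames p ≠ 0 then
    buf.set (p / 2) (PySem.Int.bor (buf.getD (p / 2) 0) (if p % 2 = 0 then 0xF0 else 0x0F))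
  else buf

theorem pvAInner_snd_only (fh : Int) (st : Nat × List Int) (a b x : Int) :
    pvAInner fh st (a, x) = pvAInner fh st (b, x) := rfl

theorem pvAInner_eq (frames : List Int) (fh j : Nat) (buf : List Int) (x : Int)
    (hj : j < frames.length) (hx : frames.getD j 0 = x) :
    pvAInner (↑fh) (fh * frames.length + j, buf) ((0 : Int), x)
      = (fh * frames.length + j + 1, pvApply frames buf (fh * frames.length + j)) := by
  have hmod : (fh * frames.length + j) % frames.length = j := by
    rw [Nat.mul_comm fh frames.length, Nat.mul_add_mod]; exact Nat.mod_eq_of_lt hj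
  have hdiv : (fh * frames.length + j) / frames.length = fh := by
    rw [Nat.mul_comm fh frames.length, Nat.mul_add_div (by omega)]
    simp [Nat.div_eq_of_lt hj]
  simp only [pvAInner, pvApply, pvBit, hmod, hdiv, hx, Int.toNat_natCast]
  split
  · split <;> simp
  · rfl

theorem pvInner_fold (frames : List Int) (fh : Nat) :
    ∀ (l : List Int) (j : Nat) (buf : List Int), frames.drop j = l → j ≤ frames.length →
    l.foldl (fun st x => pvAInner (↑fh) st ((0 : Int), x)) (fh * frames.length + j, buf)
      = (fh * frames.length + frames.length,
         (List.range' (fh * frames.length + j) (frames.length - j)).foldl (pvApply frames) buf)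
  | [], j, buf, hd, hj => by
    have : frames.length ≤ j := by
      by_contra h
      have := congrArg List.length hd
      simp [List.length_drop] at this; omega
    have hjn : j = frames.length := by omega
    subst hjn; simp
  | x :: l', j, buf, hd, hj => by
    have hjlt : j < frames.length := by
      by_contra h
      rw [List.drop_eq_nil_of_le (by omega)] at hd; simp at hd
    have hx : frames.getD j 0 = x := by
      have h0 : (frames.drop j).getD 0 0 = x := by rw [hd]; rfl
      rwa [List.getD_eq_getElem?_getD, List.getElem?_drop, Nat.add_zero,
        ← List.getD_eq_getElem?_getD] at h0
    have hd' : frames.drop (j + 1) = l' := by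
      rw [← List.drop_drop]; simp [hd]
    have hrange : List.range' (fh * frames.length + j) (frames.length - j)
        = (fh * frames.length + j) :: List.range' (fh * frames.length + j + 1) (frames.length - (j + 1)) := by
      have : frames.length - j = (frames.length - (j + 1)) + 1 := by omega
      rw [this, List.range'_succ]
    rw [List.foldl_cons, pvAInner_eq frames fh j buf x hjlt hx, hrange, List.foldl_cons]
    have := pvInner_fold frames fh l' (j + 1) (pvApply frames buf (fh * frames.length + j)) hd' (by omega)
    simpa using this

theorem pvEnum_fold (frames : List Int) (fh : Int) :
    ∀ (l : List Int) (s : Int) (st : Nat × List Int),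
    (PySem.List.enumerate l s).foldl (pvAInner fh) st
      = l.foldl (fun st x => pvAInner fh st ((0 : Int), x)) st
  | [], s, st => by simp [PySem.List.enumerate_nil]
  | x :: l', s, st => by
    rw [PySem.List.enumerate_cons, List.foldl_cons, List.foldl_cons,
      pvAInner_snd_only fh st s 0 x]
    exact pvEnum_fold frames fh l' (s + 1) _

theorem pvOuter_fold (frames : List Int) :
    ∀ (H h0 : Nat) (buf : List Int),
    (PySem.List.pyRange (↑h0) (↑h0 + ↑H) 1).foldl
        (fun st fh => (PySem.List.enumerate frames 0).foldl (pvAInner fh) st)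
        (h0 * frames.length, buf)
      = ((h0 + H) * frames.length,
         (List.range' (h0 * frames.length) (H * frames.length)).foldl (pvApply frames) buf)
  | 0, h0, buf => by
    rw [PySem.List.pyRange_one_eq_nil (by simp)]
    simp
  | H + 1, h0, buf => by
    have hstep := pvInner_fold frames h0 frames 0 buf (by simp) (by omega)
    simp only [Nat.add_zero, Nat.sub_zero] at hstep
    rw [PySem.List.pyRange_one_cons (by push_cast; omega), List.foldl_cons,
      pvEnum_fold frames (↑h0) frames 0 _, hstep]
    have hcast : (↑h0 + 1 : Int) = ((h0 + 1 : Nat) : Int) := by push_cast; ring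
    have hcast2 : (↑h0 + (↑(H + 1) : Int)) = ((h0 + 1 : Nat) : Int) + (↑H : Int) := by push_cast; ring
    have hn : h0 * frames.length + frames.length = (h0 + 1) * frames.length := by ring
    rw [hcast, hcast2, hn, pvOuter_fold frames H (h0 + 1) _]
    have happ : List.range' (h0 * frames.length) frames.length ++
        List.range' ((h0 + 1) * frames.length) (H * frames.length)
        = List.range' (h0 * frames.length) ((H + 1) * frames.length) := by
      have := List.range'_append (s := h0 * frames.length) (m := frames.length)
        (n := H * frames.length) (step := 1)
      simp only [Nat.one_mul] at this
      rw [show (H + 1) * frames.length = frames.length + H * frames.length from by ring, ← hn]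
      exact this
    rw [← happ, List.foldl_append, show h0 + 1 + H = h0 + (H + 1) from by omega]

theorem pvA_eq_fold (frames : List Int) :
    frames_8_to_32_pair frames
      = (List.range' 0 (8 * frames.length)).foldl (pvApply frames)
          (List.replicate (frames.length * 4) 0) := by
  unfold frames_8_to_32_pair
  have := pvOuter_fold frames 8 0 (List.replicate (frames.length * 4) 0)
  simp only [Nat.zero_mul, Nat.zero_add, Nat.cast_ofNat, Nat.cast_zero, Int.zero_add] at this
  rw [this]

theorem pvApply_length (frames buf : List Int) (p : Nat) :
    (pvApply frames buf p).length = buf.length := by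
  unfold pvApply; split <;> simp

theorem pvFold_length (frames : List Int) :
    ∀ (ps : List Nat) (buf : List Int),
    (ps.foldl (pvApply frames) buf).length = buf.length
  | [], buf => rfl
  | p :: ps', buf => by
    rw [List.foldl_cons, pvFold_length frames ps' _, pvApply_length]

theorem pvApply_getD_ne (frames buf : List Int) (p i : Nat) (h : p / 2 ≠ i) :
    (pvApply frames buf p).getD i 0 = buf.getD i 0 := by
  unfold pvApply; split
  · rw [List.getD_eq_getElem?_getD, List.getElem?_set_ne h, ← List.getD_eq_getElem?_getD]
  · rfl

theorem pvFold_getD_ne (frames : List Int) (i : Nat) :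
    ∀ (ps : List Nat) (buf : List Int), (∀ p ∈ ps, p / 2 ≠ i) →
    (ps.foldl (pvApply frames) buf).getD i 0 = buf.getD i 0
  | [], buf, _ => rfl
  | p :: ps', buf, h => by
    rw [List.foldl_cons, pvFold_getD_ne frames i ps' _ (fun q hq => h q (by simp [hq])),
      pvApply_getD_ne frames buf p i (h p (by simp))]

theorem pvApply_getD_self (frames buf : List Int) (p : Nat) (h : p / 2 < buf.length) :
    (pvApply frames buf p).getD (p / 2) 0
      = if pvBit frames p ≠ 0 then
          PySem.Int.bor (buf.getD (p / 2) 0) (if p % 2 = 0 then 0xF0 else 0x0F)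
        else buf.getD (p / 2) 0 := by
  unfold pvApply; split
  · rw [List.getD_eq_getElem?_getD, List.getElem?_set_self h]; rfl
  · rfl

theorem pvMain (frames : List Int) :
    frames_8_to_32_pair frames = frames_8_to_32_pair_alt frames := by
  rw [pvA_eq_fold]
  apply List.ext_getElem
  · rw [pvFold_length]; simp [frames_8_to_32_pair_alt]
  · intro i h1 h2
    rw [(List.getD_eq_getElem _ 0 h1).symm, (List.getD_eq_getElem _ 0 h2).symm]
    set n := frames.length with hn
    have hi : i < n * 4 := by rwa [pvFold_length, List.length_replicate] at h1
    -- split the pixel list around 2i, 2i+1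
    have hsplit : List.range' 0 (8 * n)
        = (List.range' 0 (2 * i) ++ [2 * i, 2 * i + 1]) ++ List.range' (2 * i + 2) (8 * n - (2 * i + 2)) := by
      have e1 : List.range' 0 (2 * i + 2) = List.range' 0 (2 * i) ++ [2 * i, 2 * i + 1] := by
        have := List.range'_append (s := 0) (m := 2 * i) (n := 2) (step := 1)
        simp only [Nat.one_mul, Nat.zero_add] at this
        rw [← this]; rfl
      have e2 := List.range'_append (s := 0) (m := 2 * i + 2) (n := 8 * n - (2 * i + 2)) (step := 1)
      simp only [Nat.one_mul, Nat.zero_add] at e2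
      rw [← e1, e2]; congr 1; omega
    rw [hsplit, List.foldl_append, List.foldl_append]
    -- the tail pixels do not touch byte i
    rw [pvFold_getD_ne frames i _ _ (by
      intro p hp
      have := List.mem_range'.mp hp
      omega)]
    -- the prefix pixels do not touch byte i
    have hpre : (List.foldl (pvApply frames) (List.replicate (n * 4) 0) (List.range' 0 (2 * i))).getD i 0 = 0 := by
      rw [pvFold_getD_ne frames i _ _ (by
        intro p hp
        have := List.mem_range'.mp hp
        omega)]
      simp [List.getD, hi]
    set bufP := List.foldl (pvApply frames) (List.replicate (n * 4) 0) (List.range' 0 (2 * i)) with hbufP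
    have hlenP : bufP.length = n * 4 := by rw [hbufP, pvFold_length, List.length_replicate]
    have hd1 : (2 * i) / 2 = i := by omega
    have hd2 : (2 * i + 1) / 2 = i := by omega
    have hm1 : (2 * i) % 2 = 0 := by omega
    have hm2 : (2 * i + 1) % 2 = 1 := by omega
    have hlen1 : (pvApply frames bufP (2 * i)).length = n * 4 := by rw [pvApply_length, hlenP]
    show (List.foldl (pvApply frames) bufP [2 * i, 2 * i + 1]).getD i 0 = _
    simp only [List.foldl_cons, List.foldl_nil]
    have t2 := pvApply_getD_self frames (pvApply frames bufP (2 * i)) (2 * i + 1) (by omega)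
    rw [hd2] at t2
    have t1 := pvApply_getD_self frames bufP (2 * i) (by omega)
    rw [hd1] at t1
    rw [t2, t1, hpre, hm1, hm2]
    have hB : (frames_8_to_32_pair_alt frames).getD i 0 =
        PySem.Int.bor (if pvBit frames (2 * i) ≠ 0 then 0xF0 else 0)
                      (if pvBit frames (2 * i + 1) ≠ 0 then 0x0F else 0) := by
      simp only [frames_8_to_32_pair_alt, List.getD_eq_getElem?_getD, List.getElem?_map,
        List.getElem?_range (show i < frames.length * 4 by omega), Option.map_some,
        Option.getD_some]
    rw [hB]
    by_cases b0 : pvBit frames (2 * i) ≠ 0 <;> by_cases b1 : pvBit frames (2 * i + 1) ≠ 0 <;>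
      simp [b0, b1] <;> decide

-- ===== VERDICT (by name: the statement is the Claim_ definition above) =====
theorem frames_8_to_32_pair_spec : Claim_equal_frames_8_to_32_pair := by
  intro frames _
  unfold Spec_frames_8_to_32_pair
  exact pvMain frames
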